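-- pv_equiv track=rewrite | github.com/AmadoMiguel/Coding-problems | Python/December-2019/findSortingRange.py | moveToEnd
-- ===== SOURCE A (Python) =====
-- def swapNums(arr, indx1, indx2):
--     temp = arr[indx1]
--     arr[indx1] = arr[indx2]
--     arr[indx2] = temp
--
-- def moveToEnd(arr, indxOfMoved):
--     wasMoved, finalIndex = False, indxOfMoved
--     while finalIndex < len(arr) - 1:
--         if arr[finalIndex] > arr[finalIndex + 1]:
--             swapNums(arr, finalIndex, finalIndex + 1)
--             finalIndex += 1
--             if not wasMoved:
--                 wasMoved = True
--         else:
--             break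
--     return wasMoved, finalIndex
-- ===== SOURCE B (Python) =====
-- def moveToEnd(arr, indxOfMoved):
--     # Read-only scan for the target position, then one bulk slice rotation.
--     j = indxOfMoved
--     if j >= len(arr) - 1:
--         return False, j
--     v = arr[j]
--     while j < len(arr) - 1 and v > arr[j + 1]:
--         j += 1
--     if j != indxOfMoved:
--         arr[indxOfMoved:j + 1] = arr[indxOfMoved + 1:j + 1] + [v]
--     return j != indxOfMoved, j
-- ===== Notes on version B (the rewrite author's own statement) =====
-- stated objective: simpler
-- what changed: A interleaves comparison with repeated adjacent swaps (via a swapNums helper) inside one while loop; B first does a read-only scan to find the target index and then performs the whole move with a single slice rotation, returning (j != indxOfMoved, j).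
-- outside the precondition, e.g. on moveToEnd([3, 1], -2): A returns (True, 1), B returns (True, -1)
import Mathlib
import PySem

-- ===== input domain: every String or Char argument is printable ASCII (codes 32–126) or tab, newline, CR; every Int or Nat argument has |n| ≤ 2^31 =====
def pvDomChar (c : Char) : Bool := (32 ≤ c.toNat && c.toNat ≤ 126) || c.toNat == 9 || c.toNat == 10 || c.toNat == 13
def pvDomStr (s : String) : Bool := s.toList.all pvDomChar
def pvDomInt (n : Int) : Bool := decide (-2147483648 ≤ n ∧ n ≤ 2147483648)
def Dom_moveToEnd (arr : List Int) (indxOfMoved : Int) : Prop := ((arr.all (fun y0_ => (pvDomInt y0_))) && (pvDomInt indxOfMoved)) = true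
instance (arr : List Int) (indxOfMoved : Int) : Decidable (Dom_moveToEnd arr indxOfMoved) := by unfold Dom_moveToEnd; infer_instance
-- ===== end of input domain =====

-- B replaces A's interleaved compare-and-swap bubble loop by a read-only scan for the
-- target index followed by one bulk slice rotation (objective: simpler). Both Pythons
-- mutate arr in place identically on Pre_; the equivalence proved is about the return value.


-- ===== PORT A =====
-- swapNums(arr, i1, i2): Python in-place swap, modelled functionally (pySetD is exact
-- under InRange; the pyGet? match returns arr unchanged exactly where Python raises).
def swapNumsA (arr : List Int) (indx1 indx2 : Int) : List Int :=
  match PySem.List.pyGet? arr indx1, PySem.List.pyGet? arr indx2 with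
  | some temp, some b => PySem.List.pySetD (PySem.List.pySetD arr indx1 b) indx2 temp
  | _, _ => arr
-- the while loop of A; fuel bounds the iteration count (the loop body raises where pyGet? is none)
def loopA (arr : List Int) (wasMoved : Bool) (finalIndex : Int) : Nat → Bool × Int
  | 0 => (wasMoved, finalIndex)
  | fuel + 1 =>
    if finalIndex < (arr.length : Int) - 1 then
      match PySem.List.pyGet? arr finalIndex, PySem.List.pyGet? arr (finalIndex + 1) with
      | some a, some b =>
        if a > b then
          loopA (swapNumsA arr finalIndex (finalIndex + 1)) true (finalIndex + 1) fuel
        else (wasMoved, finalIndex)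
      | _, _ => (wasMoved, finalIndex)  -- IndexError (negative wraparound out of range): outside Pre_
    else (wasMoved, finalIndex)
def moveToEnd (arr : List Int) (indxOfMoved : Int) : Bool × Int :=
  loopA arr false indxOfMoved ((arr.length - indxOfMoved).toNat + 1)

-- ===== PORT B =====
-- read-only scan: advance j while j < len-1 and v > arr[j+1]
def scanB (arr : List Int) (v : Int) (j : Int) : Nat → Int
  | 0 => j
  | fuel + 1 =>
    if j < (arr.length : Int) - 1 then
      match PySem.List.pyGet? arr (j + 1) with
      | some b => if v > b then scanB arr v (j + 1) fuel else j
      | none => j  -- IndexError: outside Pre_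
    else j
def moveToEnd_alt (arr : List Int) (indxOfMoved : Int) : Bool × Int :=
  if indxOfMoved ≥ (arr.length : Int) - 1 then (false, indxOfMoved)
  else
    match PySem.List.pyGet? arr indxOfMoved with
    | some v =>
      let j := scanB arr v indxOfMoved ((arr.length - indxOfMoved).toNat + 1)
      (decide (j ≠ indxOfMoved), j)
    | none => (false, indxOfMoved)  -- IndexError: outside Pre_

-- ===== PRECONDITION & SPEC =====
-- Pre_ excludes negative indxOfMoved, where A either raises IndexError (indxOfMoved < -len)
-- or its comparisons/swaps rely on accidental Python negative-index wraparound across the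
-- array boundary (e.g. A([3,1],-2) = (True, 1)); B scans plainly there (B([3,1],-2) = (True, -1)).
def Pre_moveToEnd (arr : List Int) (indxOfMoved : Int) : Prop := 0 ≤ indxOfMoved
instance (arr : List Int) (indxOfMoved : Int) : Decidable (Pre_moveToEnd arr indxOfMoved) := by
  unfold Pre_moveToEnd; infer_instance
def pvWitness_moveToEnd : List Int × Int := ([5, 1, 4, 2], 0)
def Spec_moveToEnd (arr : List Int) (indxOfMoved : Int) (out : Bool × Int) : Prop := out = moveToEnd_alt arr indxOfMoved
instance (arr : List Int) (indxOfMoved : Int) (out : Bool × Int) : Decidable (Spec_moveToEnd arr indxOfMoved out) := by unfold Spec_moveToEnd; infer_instance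

-- ===== CLAIM (what is proved, stated in full; the proofs are below) =====
def Claim_equal_moveToEnd : Prop := ∀ (arr : List Int) (indxOfMoved : Int), Dom_moveToEnd arr indxOfMoved → Pre_moveToEnd arr indxOfMoved → Spec_moveToEnd arr indxOfMoved (moveToEnd arr indxOfMoved)

-- ===== LEMMAS AND PROOFS =====

-- the scan never moves left
theorem scanB_ge (arr : List Int) (v : Int) : ∀ (fuel : Nat) (j : Int), j ≤ scanB arr v j fuel := by
  intro fuel
  induction fuel with
  | zero => intro j; simp [scanB]
  | succ n ih =>
    intro j
    simp only [scanB]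
    split
    · cases h : PySem.List.pyGet? arr (j + 1) with
      | none => simp
      | some b =>
        simp only
        split
        · exact le_trans (by omega) (ih (j + 1))
        · exact le_refl j
    · exact le_refl j

-- the scan only reads positions > j, so it is insensitive to changes at positions ≤ j
theorem scanB_congr (arr₁ arr₂ : List Int) (v : Int) :
    ∀ (fuel : Nat) (j : Int), arr₁.length = arr₂.length →
    (∀ k : Int, j < k → PySem.List.pyGet? arr₁ k = PySem.List.pyGet? arr₂ k) →
    scanB arr₁ v j fuel = scanB arr₂ v j fuel := by
  intro fuel
  induction fuel with
  | zero => intro j _ _; simp [scanB]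
  | succ n ih =>
    intro j hlen hagree
    simp only [scanB, hlen, hagree (j + 1) (by omega)]
    split
    · cases h : PySem.List.pyGet? arr₂ (j + 1) with
      | none => simp
      | some b =>
        simp only
        split
        · exact ih (j + 1) hlen (fun k hk => hagree k (by omega))
        · rfl
    · rfl

-- swap at (f, f+1) for 0 ≤ f, f+1 < len: length, value at f+1, values above f+1
theorem swapNumsA_len (arr : List Int) (f : Int) (a b : Int)
    (ha : PySem.List.pyGet? arr f = some a) (hb : PySem.List.pyGet? arr (f + 1) = some b) :
    (swapNumsA arr f (f + 1)).length = arr.length := by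
  simp [swapNumsA, ha, hb, PySem.List.length_pySetD]

theorem pyGet?_swapNumsA_succ (arr : List Int) (f : Int) (a b : Int) (h0 : 0 ≤ f)
    (hlt : f + 1 < (arr.length : Int))
    (ha : PySem.List.pyGet? arr f = some a) (hb : PySem.List.pyGet? arr (f + 1) = some b) :
    PySem.List.pyGet? (swapNumsA arr f (f + 1)) (f + 1) = some a := by
  simp only [swapNumsA, ha, hb]
  rw [PySem.List.pySetD_of_nonneg (xs := arr) (i := f) (v := b) (by omega),
      PySem.List.pySetD_of_nonneg (xs := arr.set f.toNat b) (i := f + 1) (v := a) (by omega),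
      PySem.List.pyGet?_of_nonneg (xs := (arr.set f.toNat b).set (f + 1).toNat a) (i := f + 1) (by omega)]
  have h1 : (f + 1).toNat < (arr.set f.toNat b).length := by simp; omega
  simp [List.getElem?_set]
  omega

theorem pyGet?_swapNumsA_gt (arr : List Int) (f : Int) (a b : Int) (h0 : 0 ≤ f)
    (hlt : f + 1 < (arr.length : Int))
    (ha : PySem.List.pyGet? arr f = some a) (hb : PySem.List.pyGet? arr (f + 1) = some b) :
    ∀ k : Int, f + 1 < k → PySem.List.pyGet? (swapNumsA arr f (f + 1)) k = PySem.List.pyGet? arr k := by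
  intro k hk
  simp only [swapNumsA, ha, hb]
  rw [PySem.List.pySetD_of_nonneg (xs := arr) (i := f) (v := b) (by omega),
      PySem.List.pySetD_of_nonneg (xs := arr.set f.toNat b) (i := f + 1) (v := a) (by omega),
      PySem.List.pyGet?_of_nonneg (xs := (arr.set f.toNat b).set (f + 1).toNat a) (i := k) (by omega),
      PySem.List.pyGet?_of_nonneg (xs := arr) (i := k) (by omega)]
  have h1 : (f + 1).toNat ≠ k.toNat := by omega
  have h2 : f.toNat ≠ k.toNat := by omega
  simp [List.getElem?_set, h1, h2]

-- a nonnegative in-range index yields some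
theorem pyGet?_isSome_of_range (arr : List Int) (i : Int) (h0 : 0 ≤ i) (h1 : i < (arr.length : Int)) :
    ∃ x, PySem.List.pyGet? arr i = some x := by
  rw [PySem.List.pyGet?_of_nonneg (xs := arr) (i := i) h0]
  exact ⟨arr[i.toNat]'(by omega), List.getElem?_eq_getElem (by omega)⟩

-- main invariant: A's loop from position f with arr[f] = v equals B's scan from f
theorem loopA_eq_scanB :
    ∀ (fuel : Nat) (arr : List Int) (f : Int) (wm : Bool) (v : Int), 0 ≤ f →
    PySem.List.pyGet? arr f = some v →
    loopA arr wm f fuel = (wm || decide (scanB arr v f fuel ≠ f), scanB arr v f fuel) := by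
  intro fuel
  induction fuel with
  | zero => intro arr f wm v _ _; simp [loopA, scanB]
  | succ n ih =>
    intro arr f wm v h0 hv
    simp only [loopA, scanB]
    split
    · rename_i hcond
      obtain ⟨b, hb⟩ := pyGet?_isSome_of_range arr (f + 1) (by omega) (by omega)
      simp only [hv, hb]
      by_cases hgt : v > b
      · rw [if_pos hgt, if_pos hgt]
        have hlen := swapNumsA_len arr f v b hv hb
        have hget := pyGet?_swapNumsA_succ arr f v b h0 (by omega) hv hb
        rw [ih (swapNumsA arr f (f + 1)) (f + 1) true v (by omega) hget]
        have hsc : scanB (swapNumsA arr f (f + 1)) v (f + 1) n = scanB arr v (f + 1) n :=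
          scanB_congr _ _ v n (f + 1) hlen (pyGet?_swapNumsA_gt arr f v b h0 (by omega) hv hb)
        rw [hsc]
        have hge : f + 1 ≤ scanB arr v (f + 1) n := scanB_ge arr v n (f + 1)
        have hne : scanB arr v (f + 1) n ≠ f := by omega
        simp [hne]
      · rw [if_neg hgt, if_neg hgt]
        simp
    · simp

-- ===== VERDICT (by name: the statement is the Claim_ definition above) =====
theorem moveToEnd_spec : Claim_equal_moveToEnd := by
  intro arr indx _ hpre
  unfold Spec_moveToEnd moveToEnd moveToEnd_alt
  have h0 : (0 : Int) ≤ indx := hpre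
  by_cases hg : indx ≥ (arr.length : Int) - 1
  · rw [if_pos hg]
    cases hf : (arr.length - indx).toNat + 1 with
    | zero => simp at hf
    | succ n => simp [loopA]; omega
  · rw [if_neg hg]
    obtain ⟨v, hv⟩ := pyGet?_isSome_of_range arr indx h0 (by omega)
    rw [hv]
    simp only
    rw [loopA_eq_scanB ((arr.length - indx).toNat + 1) arr indx false v h0 hv]
    simp
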